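-- pv_equiv track=rewrite | github.com/Vozec/DLP-Solver | utils/utils.py | Format_Factors
-- ===== SOURCE A (Python) =====
-- def Format_Factors(factors):
-- 	fct = {}
-- 	for f in factors:
-- 		if f not in fct.keys():
-- 			fct[f]  = 1
-- 		else:
-- 			fct[f] += 1
-- 	return list(fct.items())
-- ===== SOURCE B (Python) =====
-- def Format_Factors(factors):
-- 	rest = list(factors)
-- 	out = []
-- 	while rest:
-- 		f = rest[0]
-- 		remaining = [x for x in rest if x != f]
-- 		out.append((f, len(rest) - len(remaining)))
-- 		rest = remaining
-- 	return out
-- ===== Notes on version B (the rewrite author's own statement) =====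
-- stated objective: alternative
-- what changed: Replaces the single-pass dict-counter with a partition-and-extract loop: repeatedly take the first remaining factor, count it as the number of elements removed when filtering it out, and continue on the filtered remainder (no dictionary at all).
import Mathlib
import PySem

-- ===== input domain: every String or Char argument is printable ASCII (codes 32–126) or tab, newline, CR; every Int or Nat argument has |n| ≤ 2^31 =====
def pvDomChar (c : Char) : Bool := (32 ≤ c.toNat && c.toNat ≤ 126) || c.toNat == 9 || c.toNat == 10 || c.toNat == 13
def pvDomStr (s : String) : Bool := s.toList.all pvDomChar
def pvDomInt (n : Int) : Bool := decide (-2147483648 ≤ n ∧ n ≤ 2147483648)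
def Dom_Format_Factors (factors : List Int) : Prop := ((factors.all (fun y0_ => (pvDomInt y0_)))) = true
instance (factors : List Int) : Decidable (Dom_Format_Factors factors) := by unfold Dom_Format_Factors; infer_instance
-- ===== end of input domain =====

-- B replaces A's single-pass dict-counter with a partition-and-extract loop (no dictionary):
-- repeatedly take the first remaining factor, count it as the elements removed by filtering
-- it out, and continue on the remainder (alternative decomposition, same results).

-- ===== PORT A =====
-- one pass: fct[f] = 1 on first sight, else fct[f] += 1; return list(fct.items())
def Format_Factors (factors : List Int) : List (Int × Int) :=
  (factors.foldl
    (fun (fct : PySem.Dict Int Int) f =>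
      if fct.contains f = false then fct.insert f 1
      else fct.insert f (fct.getD f 0 + 1))
    PySem.Dict.empty).items

-- ===== PORT B =====
-- Source B's while loop as structural recursion on the shrinking 'rest' list;
-- out.append(...) becomes consing the same pair onto the recursive call.
def Format_Factors_alt : List Int → List (Int × Int)
  | [] => []
  | f :: t =>
    let remaining := (f :: t).filter (fun x => x != f)
    (f, ((f :: t).length : Int) - remaining.length) :: Format_Factors_alt remaining
termination_by l => l.length
decreasing_by
  have hf : (f :: t).filter (fun x => x != f) = t.filter (fun x => x != f) := by
    simp [List.filter]
  simp only [hf]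
  exact Nat.lt_succ_of_le (List.length_filter_le _ _)

-- ===== PRECONDITION & SPEC =====
def Spec_Format_Factors (factors : List Int) (out : List (Int × Int)) : Prop := out = Format_Factors_alt factors
instance (factors : List Int) (out : List (Int × Int)) : Decidable (Spec_Format_Factors factors out) := by unfold Spec_Format_Factors; infer_instance

-- ===== CLAIM (what is proved, stated in full; the proofs are below) =====
def Claim_equal_Format_Factors : Prop := ∀ (factors : List Int), Dom_Format_Factors factors → Spec_Format_Factors factors (Format_Factors factors)

-- ===== LEMMAS AND PROOFS =====
-- A's loop body is exactly the counter step: on a fresh key getD is 0, so 'insert f 1' = 'insert f (getD+1)'.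
theorem Format_Factors_step_eq :
    (fun (fct : PySem.Dict Int Int) f =>
      if fct.contains f = false then fct.insert f 1
      else fct.insert f (fct.getD f 0 + 1))
    = fun (fct : PySem.Dict Int Int) f => fct.insert f (fct.getD f 0 + 1) := by
  funext fct f
  by_cases h : fct.contains f = false
  · simp [h, PySem.Dict.getD_of_not_contains]
  · simp [h]

-- first-occurrence dedup commutes with filtering out one value
theorem ofList_filter_ne (t : List Int) (f : Int) :
    PySem.Set.ofList (t.filter (fun x => !(x == f)))
      = (PySem.Set.ofList t).filter (fun x => !(x == f)) := by
  induction t with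
  | nil => rfl
  | cons a t ih =>
    by_cases h : a = f
    · subst h
      simp only [List.filter, beq_self_eq_true, Bool.not_true, PySem.Set.ofList_cons,
        PySem.Set.discard, ih, List.filter_filter, Bool.and_self]
    · have hne : (a == f) = false := by simp [h]
      simp only [List.filter, hne, Bool.not_false, PySem.Set.ofList_cons, PySem.Set.discard,
        ih, List.filter_filter]
      congr 1
      · congr 1
        funext x
        rw [Bool.and_comm]

-- the head count: occurrences of f in l = length l - length (l with f filtered out)
theorem count_add_filter (l : List Int) (f : Int) :
    l.count f + (l.filter (fun x => !(x == f))).length = l.length := by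
  induction l with
  | nil => rfl
  | cons a l ih =>
    by_cases h : a = f <;> simp [h] <;> omega

-- the counter's items, rendered as (ordered distinct keys, counts), equal B's grouped recursion
theorem ofList_map_count_eq_alt (l : List Int) :
    (PySem.Set.ofList l).map (fun k => (k, (l.count k : Int))) = Format_Factors_alt l := by
  induction l using Format_Factors_alt.induct with
  | case1 => rw [Format_Factors_alt]; rfl
  | case2 f t remaining ih =>
    rw [Format_Factors_alt]
    have hrem : (f :: t).filter (fun x => x != f) = t.filter (fun x => !(x == f)) := by
      simp [bne]
    rw [hrem, PySem.Set.ofList_cons, List.map_cons]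
    have hcnt := count_add_filter (f :: t) f
    have hflcons : (f :: t).filter (fun x => !(x == f)) = t.filter (fun x => !(x == f)) := by
      simp
    rw [hflcons] at hcnt
    congr 1
    · have : ((f :: t).count f : Int)
          = ((f :: t).length : Int) - ((t.filter (fun x => !(x == f))).length : Int) := by
        omega
      rw [this]
    · have hd : PySem.Set.discard (PySem.Set.ofList t) f
          = PySem.Set.ofList (t.filter (fun x => !(x == f))) := by
        rw [ofList_filter_ne]; rfl
      rw [hd]
      have ih' := ih
      rw [show remaining = t.filter (fun x => !(x == f)) from hrem] at ih'
      rw [← ih']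
      apply List.map_congr_left
      intro k hk
      have hkm : k ∈ t.filter (fun x => !(x == f)) := (PySem.Set.mem_ofList _ _).1 hk
      have hkf : (k == f) = false := by
        have := List.of_mem_filter hkm
        simpa using this
      have hkf' : k ≠ f := by intro he; simp [he] at hkf
      have h1 : (f :: t).count k = t.count k := by
        have hfk : (f == k) = false := by simpa using Ne.symm hkf'
        rw [List.count_cons, hfk]
        simp
      have h2 : (t.filter (fun x => !(x == f))).count k = t.count k :=
        List.count_filter (by simp [hkf])
      rw [h1, h2]

-- ===== VERDICT (by name: the statement is the Claim_ definition above) =====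
theorem Format_Factors_spec : Claim_equal_Format_Factors := by
  intro factors _
  show Format_Factors factors = Format_Factors_alt factors
  unfold Format_Factors
  rw [Format_Factors_step_eq, PySem.Dict.foldl_insert_getD_add_one_eq_counter,
    PySem.Dict.items_counter, ofList_map_count_eq_alt]
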